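-- pv_equiv track=rewrite | github.com/IISkylineIII/Rosalind | BALLF.Py | find_best_peptide
-- ===== SOURCE A (Python) =====
-- mass_table = {
--     'A':71, 'C':103, 'D':115, 'E':129, 'F':147,
--     'G':57, 'H':137, 'I':113, 'K':128, 'L':113,
--     'M':131, 'N':114, 'P':97,  'Q':128, 'R':156,
--     'S':87, 'T':101, 'V':99,  'W':186, 'Y':163
-- }
--
-- def prefix_masses(peptide):
--     prefix = [0]
--     for aa in peptide:
--         prefix.append(prefix[-1] + mass_table[aa])
--     return prefix
--
-- def score_peptide(peptide, spectrum):
--     prefix = prefix_masses(peptide)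
--     total_score = 0
--     for mass in prefix:
--         if mass < len(spectrum):
--             total_score += spectrum[mass]
--     return total_score
--
-- def find_best_peptide(spectrum, proteome):
--     best_score = -1
--     best_peptide = ""
--     n = len(proteome)
--     for i in range(n):
--         for j in range(i+1, n+1):
--             peptide = proteome[i:j]
--             # Verifica se todos aminoácidos têm massa (para segurança)
--             if all(aa in mass_table for aa in peptide):
--                 score = score_peptide(peptide, spectrum)
--                 if score > best_score:
--                     best_score = score
--                     best_peptide = peptide
--     return best_peptide, best_score
-- ===== SOURCE B (Python) =====
-- mass_table = {
--     'A':71, 'C':103, 'D':115, 'E':129, 'F':147,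
--     'G':57, 'H':137, 'I':113, 'K':128, 'L':113,
--     'M':131, 'N':114, 'P':97,  'Q':128, 'R':156,
--     'S':87, 'T':101, 'V':99,  'W':186, 'Y':163
-- }
--
-- def find_best_peptide(spectrum, proteome):
--     L = len(spectrum)
--     base = spectrum[0] if L > 0 else 0
--     best_peptide, best_score = "", -1
--     n = len(proteome)
--     for i in range(n):
--         mass = 0
--         score = base
--         pep = ""
--         for ch in proteome[i:]:
--             m = mass_table.get(ch)
--             if m is None:
--                 break
--             mass += m
--             if mass < L:
--                 score += spectrum[mass]
--             pep += ch
--             if score > best_score: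
--                 best_peptide, best_score = pep, score
--     return best_peptide, best_score
-- ===== Notes on version B (the rewrite author's own statement) =====
-- stated objective: faster
-- what changed: Instead of rescanning and rescoring every substring from scratch (and re-checking validity of each), B keeps, per start index, a running cumulative mass and running score while extending the end index one character at a time, and breaks out as soon as an unknown residue is hit.
import Mathlib
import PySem

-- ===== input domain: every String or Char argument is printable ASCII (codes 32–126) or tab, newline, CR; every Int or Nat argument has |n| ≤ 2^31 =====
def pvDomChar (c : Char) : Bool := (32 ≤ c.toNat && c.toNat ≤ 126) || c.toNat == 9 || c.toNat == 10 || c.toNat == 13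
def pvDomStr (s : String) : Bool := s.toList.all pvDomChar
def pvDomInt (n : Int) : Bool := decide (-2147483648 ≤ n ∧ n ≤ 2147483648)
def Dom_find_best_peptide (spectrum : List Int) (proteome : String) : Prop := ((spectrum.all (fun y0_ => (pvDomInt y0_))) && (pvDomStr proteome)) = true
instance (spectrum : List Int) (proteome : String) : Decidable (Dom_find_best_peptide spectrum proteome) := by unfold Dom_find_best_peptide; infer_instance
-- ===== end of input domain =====

-- B replaces A's cubic rescan of every substring by, per start index, a single
-- incremental extension keeping a running mass and running score (objective: faster).


-- ===== PORT A =====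
def massTable : PySem.Dict Char Int :=
  PySem.Dict.ofList [('A',71), ('C',103), ('D',115), ('E',129), ('F',147),
    ('G',57), ('H',137), ('I',113), ('K',128), ('L',113),
    ('M',131), ('N',114), ('P',97),  ('Q',128), ('R',156),
    ('S',87), ('T',101), ('V',99),  ('W',186), ('Y',163)]

-- mass_table[aa]: only ever called on keys present in the table (guarded by the caller's
-- 'all aa in mass_table' check), so the .getD 0 default is never taken.
def prefix_masses (peptide : List Char) : List Int :=
  peptide.foldl (fun pr aa =>
    pr ++ [PySem.List.pyGetD pr (-1) 0 + (massTable.get? aa).getD 0]) [0]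

-- spectrum[mass]: mass is a sum of positive masses plus 0, hence ≥ 0, and guarded by
-- mass < len(spectrum), so the indexing is exact here.
def score_peptide (peptide : List Char) (spectrum : List Int) : Int :=
  (prefix_masses peptide).foldl (fun total mass =>
    if mass < (spectrum.length : Int) then total + PySem.List.pyGetD spectrum mass 0 else total) 0

def find_best_peptide (spectrum : List Int) (proteome : String) : String × Int :=
  let cs := proteome.toList
  let n : Int := (cs.length : Int)
  let st := (PySem.List.pyRange 0 n 1).foldl (fun st i =>
      (PySem.List.pyRange (i+1) (n+1) 1).foldl (fun st j =>
        let peptide := PySem.List.slice cs (some i) (some j)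
        if peptide.all (fun aa => massTable.contains aa) then
          let score := score_peptide peptide spectrum
          if score > st.2 then (peptide, score) else st
        else st) st)
    (([] : List Char), (-1 : Int))
  (String.ofList st.1, st.2)

-- ===== PORT B =====
def altInner (spectrum : List Int) (rest : List Char) (mass score : Int)
    (pep : List Char) (best : List Char × Int) : List Char × Int :=
  match rest with
  | [] => best
  | ch :: rest' =>
    match massTable.get? ch with
    | none => best
    | some m =>
      let mass' := mass + m
      let score' := if mass' < (spectrum.length : Int)
                    then score + PySem.List.pyGetD spectrum mass' 0 else score
      let pep' := pep ++ [ch]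
      let best' := if score' > best.2 then (pep', score') else best
      altInner spectrum rest' mass' score' pep' best'

def altOuter (spectrum : List Int) (base : Int) (suffix : List Char)
    (best : List Char × Int) : List Char × Int :=
  match suffix with
  | [] => best
  | _ :: rest => altOuter spectrum base rest (altInner spectrum suffix 0 base [] best)

def find_best_peptide_alt (spectrum : List Int) (proteome : String) : String × Int :=
  let base := if 0 < spectrum.length then PySem.List.pyGetD spectrum 0 0 else 0
  let st := altOuter spectrum base proteome.toList ([], -1)
  (String.ofList st.1, st.2)

-- ===== PRECONDITION & SPEC =====
def Spec_find_best_peptide (spectrum : List Int) (proteome : String) (out : String × Int) : Prop := out = find_best_peptide_alt spectrum proteome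
instance (spectrum : List Int) (proteome : String) (out : String × Int) : Decidable (Spec_find_best_peptide spectrum proteome out) := by unfold Spec_find_best_peptide; infer_instance

-- ===== CLAIM (what is proved, stated in full; the proofs are below) =====
def Claim_equal_find_best_peptide : Prop := ∀ (spectrum : List Int) (proteome : String), Dom_find_best_peptide spectrum proteome → Spec_find_best_peptide spectrum proteome (find_best_peptide spectrum proteome)

-- proof-side helpers
def fMass (c : Char) : Int := (massTable.get? c).getD 0

def scanM : List Char → Int → List Int
  | [], _ => []
  | c :: t, a => (a + fMass c) :: scanM t (a + fMass c)

def massSum (pep : List Char) : Int := (pep.map fMass).sum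

def contrib (spectrum : List Int) (m : Int) : Int :=
  if m < (spectrum.length : Int) then PySem.List.pyGetD spectrum m 0 else 0

lemma massSum_snoc (pep : List Char) (c : Char) :
    massSum (pep ++ [c]) = massSum pep + fMass c := by
  simp [massSum]

lemma scanM_snoc (pep : List Char) (a : Int) (c : Char) :
    scanM (pep ++ [c]) a = scanM pep a ++ [a + massSum pep + fMass c] := by
  induction pep generalizing a with
  | nil => simp [scanM, massSum]
  | cons d t ih =>
    simp only [List.cons_append, scanM, ih, List.cons_append]
    have : massSum (d :: t) = fMass d + massSum t := by simp [massSum]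
    rw [this]
    ring_nf

lemma pm_foldl (pep : List Char) : ∀ (init : List Int) (a : Int),
    PySem.List.pyGetD init (-1) 0 = a →
    pep.foldl (fun pr aa => pr ++ [PySem.List.pyGetD pr (-1) 0 + (massTable.get? aa).getD 0]) init
      = init ++ scanM pep a := by
  induction pep with
  | nil => intro init a _; simp [scanM]
  | cons c t ih =>
    intro init a h
    simp only [List.foldl_cons]
    rw [h]
    rw [ih (init ++ [a + (massTable.get? c).getD 0]) (a + fMass c)
      (by rw [PySem.List.pyGetD_neg_one_append_singleton]; rfl)]
    simp [scanM, fMass]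

lemma pm_eq (pep : List Char) : prefix_masses pep = 0 :: scanM pep 0 := by
  rw [prefix_masses, pm_foldl pep [0] 0 (by decide)]
  rfl

lemma score_snoc (spectrum : List Int) (pep : List Char) (c : Char) :
    score_peptide (pep ++ [c]) spectrum
      = score_peptide pep spectrum + contrib spectrum (massSum pep + fMass c) := by
  unfold score_peptide
  rw [pm_eq, pm_eq, scanM_snoc]
  rw [show (0 : Int) :: (scanM pep 0 ++ [0 + massSum pep + fMass c])
        = (((0 : Int) :: scanM pep 0) ++ [massSum pep + fMass c]) by simp]
  rw [List.foldl_append]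
  simp only [List.foldl_cons, List.foldl_nil, contrib]
  split_ifs <;> simp

lemma score_nil (spectrum : List Int) :
    score_peptide [] spectrum
      = (if 0 < spectrum.length then PySem.List.pyGetD spectrum 0 0 else 0) := by
  unfold score_peptide
  rw [pm_eq]
  simp only [scanM, List.foldl_cons, List.foldl_nil]
  by_cases h : 0 < spectrum.length
  · simp [h]
  · simp [h]
lemma take_snoc (cs : List Char) (i k : Nat) (hik : i ≤ k) (hk : k < cs.length) :
    (cs.drop i).take (k + 1 - i) = (cs.drop i).take (k - i) ++ [cs[k]] := by
  rw [show k + 1 - i = (k - i) + 1 by omega, List.take_add_one]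
  have h : (cs.drop i)[k - i]? = some cs[k] := by
    rw [List.getElem?_drop, show i + (k - i) = k by omega]
    exact List.getElem?_eq_getElem hk
  simp [h]

lemma invalid_slice (cs : List Char) (i k : Nat) (j : Int) (hik : i ≤ k) (hk : k < cs.length)
    (hj : (k : Int) < j) (hc : massTable.contains cs[k] = false) :
    (PySem.List.slice cs (some (i : Int)) (some j)).all (fun aa => massTable.contains aa) = false := by
  rw [List.all_eq_false]
  refine ⟨cs[k], ?_, by simp [hc]⟩
  rw [PySem.List.slice_toNat cs (by omega) (by omega)]
  have hkj : k < j.toNat := by omega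
  have h : ((cs.drop (i : Int).toNat).take (j.toNat - (i : Int).toNat))[k - i]? = some cs[k] := by
    rw [List.getElem?_take_of_lt (by omega), List.getElem?_drop]
    rw [show (i : Int).toNat + (k - i) = k by omega]
    exact List.getElem?_eq_getElem hk
  exact List.mem_of_getElem? h

lemma foldl_fix {α β : Type} (f : β → α → β) :
    ∀ (l : List α) (b : β), (∀ x ∈ l, f b x = b) → l.foldl f b = b := by
  intro l
  induction l with
  | nil => intro b _; rfl
  | cons x t ih =>
    intro b h
    rw [List.foldl_cons, h x (by simp)]
    exact ih b (fun y hy => h y (by simp [hy]))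
def bodyA (spectrum : List Int) (cs : List Char) (i : Int) (st : List Char × Int) (j : Int) :
    List Char × Int :=
  let peptide := PySem.List.slice cs (some i) (some j)
  if peptide.all (fun aa => massTable.contains aa) then
    let score := score_peptide peptide spectrum
    if score > st.2 then (peptide, score) else st
  else st

lemma innerEq (spectrum : List Int) (cs : List Char) (i : Nat) :
    ∀ (m k : Nat) (st : List Char × Int), cs.length - k = m → i ≤ k → k ≤ cs.length →
    ((cs.drop i).take (k - i)).all (fun aa => massTable.contains aa) = true →
    (PySem.List.pyRange ((k : Int) + 1) ((cs.length : Int) + 1) 1).foldl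
      (bodyA spectrum cs (i : Int)) st
    = altInner spectrum (cs.drop k) (massSum ((cs.drop i).take (k - i)))
        (score_peptide ((cs.drop i).take (k - i)) spectrum) ((cs.drop i).take (k - i)) st := by
  intro m
  induction m with
  | zero =>
    intro k st hm hik hk _
    have hkn : k = cs.length := by omega
    subst hkn
    rw [PySem.List.pyRange_one_eq_nil (by omega)]
    simp [altInner]
  | succ m ih =>
    intro k st hm hik hkn hval
    have hklt : k < cs.length := by omega
    have hdrop : cs.drop k = cs[k] :: cs.drop (k + 1) := List.drop_eq_getElem_cons hklt
    rw [PySem.List.pyRange_one_cons (by omega), List.foldl_cons, hdrop]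
    have hs : PySem.List.slice cs (some (i : Int)) (some ((k : Int) + 1))
        = (cs.drop i).take (k + 1 - i) := by
      have := PySem.List.slice_natCast cs i (k + 1)
      push_cast at this
      exact this
    cases hc : massTable.get? cs[k] with
    | some mv =>
      have hcont : massTable.contains cs[k] = true := by
        rw [PySem.Dict.contains_eq_isSome_get?, hc]; rfl
      have hfm : fMass cs[k] = mv := by simp [fMass, hc]
      have hsnoc := take_snoc cs i k hik hklt
      have hval' : ((cs.drop i).take (k + 1 - i)).all (fun aa => massTable.contains aa) = true := by
        rw [hsnoc, List.all_append]
        simp [hval, hcont]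
      have hbody : bodyA spectrum cs (i : Int) st ((k : Int) + 1)
          = (if score_peptide ((cs.drop i).take (k + 1 - i)) spectrum > st.2
             then ((cs.drop i).take (k + 1 - i), score_peptide ((cs.drop i).take (k + 1 - i)) spectrum)
             else st) := by
        simp only [bodyA, hs, hval', if_true]
      rw [hbody]
      have ihh := ih (k + 1)
          (if score_peptide ((cs.drop i).take (k + 1 - i)) spectrum > st.2
           then ((cs.drop i).take (k + 1 - i), score_peptide ((cs.drop i).take (k + 1 - i)) spectrum)
           else st) (by omega) (by omega) (by omega) hval'
      push_cast at ihh
      rw [ihh]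
      have hmass : massSum ((cs.drop i).take (k + 1 - i))
          = massSum ((cs.drop i).take (k - i)) + mv := by
        rw [hsnoc, massSum_snoc, hfm]
      have hsc : (if massSum ((cs.drop i).take (k - i)) + mv < (spectrum.length : Int)
            then score_peptide ((cs.drop i).take (k - i)) spectrum
                  + PySem.List.pyGetD spectrum (massSum ((cs.drop i).take (k - i)) + mv) 0
            else score_peptide ((cs.drop i).take (k - i)) spectrum)
          = score_peptide ((cs.drop i).take (k + 1 - i)) spectrum := by
        rw [hsnoc, score_snoc, hfm]
        unfold contrib
        split_ifs <;> ring
      simp only [altInner, hc]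
      rw [hsc, ← hmass, ← hsnoc]
    | none =>
      have hcont : massTable.contains cs[k] = false := by
        rw [PySem.Dict.contains_eq_isSome_get?, hc]; rfl
      have hbody : bodyA spectrum cs (i : Int) st ((k : Int) + 1) = st := by
        simp only [bodyA]
        simp [invalid_slice cs i k ((k : Int) + 1) hik hklt (by omega) hcont]
      rw [hbody]
      simp only [altInner, hc]
      exact foldl_fix _ _ st (by
        intro j hj
        rw [PySem.List.mem_pyRange_one] at hj
        simp only [bodyA]
        simp [invalid_slice cs i k j hik hklt (by omega) hcont])
lemma outerEq (spectrum : List Int) (cs : List Char) :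
    ∀ (m k : Nat) (st : List Char × Int), cs.length - k = m → k ≤ cs.length →
    (PySem.List.pyRange (k : Int) (cs.length : Int) 1).foldl
      (fun st i =>
        (PySem.List.pyRange (i + 1) ((cs.length : Int) + 1) 1).foldl (bodyA spectrum cs i) st) st
    = altOuter spectrum (if 0 < spectrum.length then PySem.List.pyGetD spectrum 0 0 else 0)
        (cs.drop k) st := by
  intro m
  induction m with
  | zero =>
    intro k st hm hk
    have hkn : k = cs.length := by omega
    subst hkn
    rw [PySem.List.pyRange_one_eq_nil (by omega)]
    simp [altOuter]
  | succ m ih =>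
    intro k st hm hkn
    have hklt : k < cs.length := by omega
    have hdrop : cs.drop k = cs[k] :: cs.drop (k + 1) := List.drop_eq_getElem_cons hklt
    rw [PySem.List.pyRange_one_cons (by omega)]
    simp only [List.foldl_cons]
    rw [innerEq spectrum cs k (cs.length - k) k st rfl (le_refl k) (by omega) (by simp)]
    have ihh := ih (k + 1) (altInner spectrum (cs.drop k)
        (massSum ((cs.drop k).take (k - k))) (score_peptide ((cs.drop k).take (k - k)) spectrum)
        ((cs.drop k).take (k - k)) st) (by omega) (by omega)
    push_cast at ihh
    rw [ihh]
    conv_rhs => rw [hdrop]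
    simp only [altOuter]
    rw [← hdrop]
    simp [massSum, score_nil]
lemma portA_eq (spectrum : List Int) (proteome : String) :
    find_best_peptide spectrum proteome =
      (fun st : List Char × Int => (String.ofList st.1, st.2))
        ((PySem.List.pyRange 0 ((proteome.toList.length : Int)) 1).foldl
          (fun st i =>
            (PySem.List.pyRange (i + 1) ((proteome.toList.length : Int) + 1) 1).foldl
              (bodyA spectrum proteome.toList i) st) ([], -1)) := rfl

-- ===== VERDICT (by name: the statement is the Claim_ definition above) =====
theorem find_best_peptide_spec : Claim_equal_find_best_peptide := by
  intro spectrum proteome _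
  unfold Spec_find_best_peptide
  rw [portA_eq]
  have h := outerEq spectrum proteome.toList proteome.toList.length 0 ([], -1) (by omega) (by omega)
  simp only [Nat.cast_zero, List.drop_zero] at h
  rw [h]
  rfl
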